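-- pv_equiv track=rewrite | github.com/bhrdj/el_documents | scripts/reformat_manual/analyze_template.py | analyze_spacing_patterns
-- ===== SOURCE A (Python) =====
-- def analyze_spacing_patterns(text: str) -> dict:
--     """
--     Analyze spacing patterns in the text.
--
--     Returns dictionary with spacing analysis.
--     """
--     lines = text.split('\n')
--
--     spacing_patterns = {
--         'consecutive_blank_lines': [],
--         'paragraph_spacing': [],
--         'section_spacing': []
--     }
--
--     blank_count = 0
--     for i, line in enumerate(lines):
--         if not line.strip():
--             blank_count += 1
--         else:
--             if blank_count > 0:
--                 spacing_patterns['consecutive_blank_lines'].append(blank_count)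
--             blank_count = 0
--
--     return spacing_patterns
-- ===== SOURCE B (Python) =====
-- def analyze_spacing_patterns(text: str) -> dict:
--     lines = text.split('\n')
--     nonblank = [i for i, line in enumerate(lines) if line.strip()]
--     runs = [j - i - 1 for i, j in zip([-1] + nonblank, nonblank) if j - i - 1 > 0]
--     return {
--         'consecutive_blank_lines': runs,
--         'paragraph_spacing': [],
--         'section_spacing': []
--     }
-- ===== Notes on version B (the rewrite author's own statement) =====
-- stated objective: idiomatic
-- what changed: Replaces the stateful blank-counter loop by an index-based pipeline: collect the indices of non-blank lines, then compute each blank run as the gap between consecutive non-blank indices (with -1 prepended), which drops a trailing blank run automatically.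
import Mathlib
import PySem

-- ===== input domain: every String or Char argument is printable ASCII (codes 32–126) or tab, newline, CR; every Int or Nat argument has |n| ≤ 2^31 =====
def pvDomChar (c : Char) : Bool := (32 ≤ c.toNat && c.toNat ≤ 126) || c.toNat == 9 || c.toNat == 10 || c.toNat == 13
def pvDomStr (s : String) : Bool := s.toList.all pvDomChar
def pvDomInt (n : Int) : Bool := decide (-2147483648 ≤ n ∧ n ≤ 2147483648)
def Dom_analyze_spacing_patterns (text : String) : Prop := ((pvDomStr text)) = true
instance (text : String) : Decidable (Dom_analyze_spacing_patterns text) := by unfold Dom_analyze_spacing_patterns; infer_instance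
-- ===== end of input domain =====

-- B replaces A's stateful blank-counter loop by an index pipeline (gaps between
-- consecutive non-blank line indices); same result, no speed claim.
-- text.split('\n') is ported as PySem.Chars.splitOn (exact: the separator is the
-- non-empty literal '\n', so Python cannot raise here).

-- ===== PORT A =====
def analyze_spacing_patterns (text : String) : List (String × List Int) :=
  let lines := (PySem.Chars.splitOn text.toList ['\n']).map String.ofList
  let st :=
    (PySem.List.enumerate lines 0).foldl
      (fun (s : Int × List Int) p =>
        if PySem.Str.strip p.2 == "" then (s.1 + 1, s.2)
        else (0, if s.1 > 0 then s.2 ++ [s.1] else s.2))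
      (0, [])
  [("consecutive_blank_lines", st.2), ("paragraph_spacing", ([] : List Int)),
   ("section_spacing", ([] : List Int))]

-- ===== PORT B =====
def analyze_spacing_patterns_alt (text : String) : List (String × List Int) :=
  let lines := (PySem.Chars.splitOn text.toList ['\n']).map String.ofList
  let nonblank : List Int :=
    ((PySem.List.enumerate lines 0).filter (fun p => !(PySem.Str.strip p.2 == ""))).map (fun p => p.1)
  let runs : List Int :=
    ((((-1 : Int) :: nonblank).zip nonblank).filter (fun q => decide (q.2 - q.1 - 1 > 0))).map
      (fun q => q.2 - q.1 - 1)
  [("consecutive_blank_lines", runs), ("paragraph_spacing", ([] : List Int)),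
   ("section_spacing", ([] : List Int))]

-- ===== PRECONDITION & SPEC =====
def Spec_analyze_spacing_patterns (text : String) (out : List (String × List Int)) : Prop := out = analyze_spacing_patterns_alt text
instance (text : String) (out : List (String × List Int)) : Decidable (Spec_analyze_spacing_patterns text out) := by unfold Spec_analyze_spacing_patterns; infer_instance

-- ===== CLAIM (what is proved, stated in full; the proofs are below) =====
def Claim_equal_analyze_spacing_patterns : Prop := ∀ (text : String), Dom_analyze_spacing_patterns text → Spec_analyze_spacing_patterns text (analyze_spacing_patterns text)

-- ===== LEMMAS AND PROOFS =====

-- recursive characterisation of A's counter loop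
def runA (c : Int) : List String → List Int
  | [] => []
  | l :: ls =>
    if PySem.Str.strip l == "" then runA (c + 1) ls
    else (if c > 0 then [c] else []) ++ runA 0 ls

-- recursive characterisation of B's gap pipeline (p = previous non-blank index, k = current index)
def runB : Int → Int → List String → List Int
  | _, _, [] => []
  | p, k, l :: ls =>
    if PySem.Str.strip l == "" then runB p (k + 1) ls
    else (if k - p - 1 > 0 then [k - p - 1] else []) ++ runB k (k + 1) ls

theorem foldA_eq_runA (lines : List String) (s c : Int) (acc : List Int) :
    ((PySem.List.enumerate lines s).foldl
      (fun (st : Int × List Int) p =>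
        if PySem.Str.strip p.2 == "" then (st.1 + 1, st.2)
        else (0, if st.1 > 0 then st.2 ++ [st.1] else st.2))
      (c, acc)).2 = acc ++ runA c lines := by
  induction lines generalizing s c acc with
  | nil => simp [PySem.List.enumerate_nil, runA]
  | cons l ls ih =>
    rw [PySem.List.enumerate_cons, List.foldl_cons]
    show ((PySem.List.enumerate ls (s + 1)).foldl _
        (if PySem.Str.strip l == "" then (c + 1, acc)
         else (0, if c > 0 then acc ++ [c] else acc))).2 = acc ++ runA c (l :: ls)
    by_cases hb : PySem.Str.strip l == ""
    · rw [if_pos hb, ih]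
      try rw [runA, if_pos hb]
    · rw [if_neg hb, runA, if_neg hb]
      by_cases hc : c > 0
      · rw [if_pos hc, if_pos hc, ih, List.append_assoc]
      · rw [if_neg hc, if_neg hc, ih, List.nil_append]

def nbIdx (s : Int) (lines : List String) : List Int :=
  ((PySem.List.enumerate lines s).filter (fun p => !(PySem.Str.strip p.2 == ""))).map (fun p => p.1)

theorem nbIdx_cons (s : Int) (l : String) (ls : List String) :
    nbIdx s (l :: ls) =
      if PySem.Str.strip l == "" then nbIdx (s + 1) ls else s :: nbIdx (s + 1) ls := by
  by_cases hb : PySem.Str.strip l == "" <;>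
    simp [nbIdx, PySem.List.enumerate_cons, hb]

theorem pipe_eq_runB (lines : List String) (p s : Int) :
    (((p :: nbIdx s lines).zip (nbIdx s lines)).filter (fun q => decide (q.2 - q.1 - 1 > 0))).map
        (fun q => q.2 - q.1 - 1) = runB p s lines := by
  induction lines generalizing p s with
  | nil => simp [nbIdx, PySem.List.enumerate_nil, runB]
  | cons l ls ih =>
    rw [nbIdx_cons]
    by_cases hb : PySem.Str.strip l == ""
    · rw [if_pos hb, runB, if_pos hb]
      exact ih p (s + 1)
    · rw [if_neg hb, runB, if_neg hb, List.zip_cons_cons, List.filter_cons]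
      by_cases hg : s - p - 1 > 0
      · rw [if_pos (show ((fun q : Int × Int => decide (q.2 - q.1 - 1 > 0)) (p, s)) = true from
              decide_eq_true hg),
            List.map_cons, ih s (s + 1), if_pos hg]
        rfl
      · rw [if_neg (show ¬ ((fun q : Int × Int => decide (q.2 - q.1 - 1 > 0)) (p, s)) = true from by
              simpa using hg),
            ih s (s + 1), if_neg hg, List.nil_append]

theorem runA_eq_runB (lines : List String) (p k : Int) (h : p < k) :
    runA (k - p - 1) lines = runB p k lines := by
  induction lines generalizing p k with
  | nil => simp [runA, runB]
  | cons l ls ih =>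
    by_cases hb : PySem.Str.strip l == ""
    · rw [runA, if_pos hb, runB, if_pos hb,
          show k - p - 1 + 1 = k + 1 - p - 1 from by ring]
      exact ih p (k + 1) (by omega)
    · rw [runA, if_neg hb, runB, if_neg hb,
          show (0 : Int) = k + 1 - k - 1 from by ring]
      rw [ih k (k + 1) (by omega)]

theorem core_eq (lines : List String) :
    ((PySem.List.enumerate lines 0).foldl
      (fun (s : Int × List Int) p =>
        if PySem.Str.strip p.2 == "" then (s.1 + 1, s.2)
        else (0, if s.1 > 0 then s.2 ++ [s.1] else s.2))
      (0, [])).2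
    =
    (let nonblank : List Int :=
      ((PySem.List.enumerate lines 0).filter (fun p => !(PySem.Str.strip p.2 == ""))).map (fun p => p.1)
     ((((-1 : Int) :: nonblank).zip nonblank).filter (fun q => decide (q.2 - q.1 - 1 > 0))).map
        (fun q => q.2 - q.1 - 1)) := by
  show _ = (((((-1 : Int) :: nbIdx 0 lines).zip (nbIdx 0 lines)).filter
      (fun q => decide (q.2 - q.1 - 1 > 0))).map (fun q => q.2 - q.1 - 1))
  rw [pipe_eq_runB, ← runA_eq_runB lines (-1) 0 (by omega), foldA_eq_runA lines 0 0 [],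
      List.nil_append]
  norm_num

-- ===== VERDICT (by name: the statement is the Claim_ definition above) =====
theorem analyze_spacing_patterns_spec : Claim_equal_analyze_spacing_patterns := by
  intro text _
  show analyze_spacing_patterns text = analyze_spacing_patterns_alt text
  exact congrArg
    (fun r => [("consecutive_blank_lines", r), ("paragraph_spacing", ([] : List Int)),
               ("section_spacing", ([] : List Int))])
    (core_eq ((PySem.Chars.splitOn text.toList ['\n']).map String.ofList))
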